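-- pv_equiv track=rewrite | github.com/Althuaf123/Data-Structures-and-Algortihm | Sorting/Insertion Sort/insert_target.py | insert_target
-- ===== SOURCE A (Python) =====
-- def insert_target(arr, target):
--     arr.append(target)
--     for i in range(1, len(arr)):
--         current_element = arr[i]
--         j = i - 1
--         while j >= 0 and current_element < arr[j]:
--             arr[j+1] = arr[j]
--             j -= 1
--         arr[j+1] = current_element
--
--     return arr
-- ===== SOURCE B (Python) =====
-- def _merge(xs, ys):
--     out = []
--     i = j = 0
--     while i < len(xs) and j < len(ys):
--         if xs[i] <= ys[j]:
--             out.append(xs[i]); i += 1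
--         else:
--             out.append(ys[j]); j += 1
--     out.extend(xs[i:])
--     out.extend(ys[j:])
--     return out
--
-- def _msort(l):
--     if len(l) <= 1:
--         return l[:]
--     m = len(l) // 2
--     return _merge(_msort(l[:m]), _msort(l[m:]))
--
-- def insert_target(arr, target):
--     arr.append(target)
--     arr[:] = _msort(arr)
--     return arr
-- ===== Notes on version B (the rewrite author's own statement) =====
-- stated objective: faster
-- what changed: Replaces the in-place insertion sort of arr+[target] with a top-down merge sort (split, recurse, merge) written back with arr[:] so the same list object is mutated and returned.
import Mathlib
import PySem

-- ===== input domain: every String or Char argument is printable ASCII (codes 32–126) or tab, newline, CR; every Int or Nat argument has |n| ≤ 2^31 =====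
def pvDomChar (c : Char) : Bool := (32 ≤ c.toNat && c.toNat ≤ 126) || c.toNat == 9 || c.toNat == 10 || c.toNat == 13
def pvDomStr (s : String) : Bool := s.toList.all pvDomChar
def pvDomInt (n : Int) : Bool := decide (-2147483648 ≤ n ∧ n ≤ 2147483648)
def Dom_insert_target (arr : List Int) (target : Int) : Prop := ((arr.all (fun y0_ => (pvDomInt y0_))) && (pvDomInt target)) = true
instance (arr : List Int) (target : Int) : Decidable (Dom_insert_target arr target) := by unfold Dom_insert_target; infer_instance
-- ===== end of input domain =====

-- B replaces A's in-place insertion sort with a top-down merge sort (asymptotically faster);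
-- both Pythons mutate `arr` in place and return that same object; the theorems are about the return value.

-- ===== PORT A =====
-- the inner `while j >= 0 and current < arr[j]` loop; the state is j+1 (a Nat, so `j >= 0` is `k ≠ 0`)
def insertShiftA (cur : Int) : Nat → List Int → List Int
  | 0, xs => xs.set 0 cur
  | k+1, xs =>
    if cur < xs.getD k 0 then insertShiftA cur k (xs.set (k+1) (xs.getD k 0))
    else xs.set (k+1) cur

def insert_target (arr : List Int) (target : Int) : List Int :=
  let a := arr ++ [target]                         -- arr.append(target)
  (List.range' 1 (a.length - 1)).foldl             -- for i in range(1, len(arr))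
    (fun xs i => insertShiftA (xs.getD i 0) i xs) a

-- ===== PORT B =====
-- the `while i < len(xs) and j < len(ys)` merge loop of Source B (`out` is the accumulator;
-- advancing i/j is modelled by consuming the list; the final case is the two `extend`s)
def mergeGoB : List Int → List Int → List Int → List Int
  | acc, x::xs, y::ys =>
    if x ≤ y then mergeGoB (acc ++ [x]) xs (y::ys) else mergeGoB (acc ++ [y]) (x::xs) ys
  | acc, xs, ys => acc ++ xs ++ ys
termination_by _ xs ys => xs.length + ys.length

def msortB (l : List Int) : List Int :=
  if l.length ≤ 1 then l
  else mergeGoB [] (msortB (l.take (l.length / 2))) (msortB (l.drop (l.length / 2)))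
termination_by l.length
decreasing_by
  · simp; omega
  · simp; omega

def insert_target_alt (arr : List Int) (target : Int) : List Int :=
  msortB (arr ++ [target])

-- ===== PRECONDITION & SPEC =====
def Spec_insert_target (arr : List Int) (target : Int) (out : List Int) : Prop := out = insert_target_alt arr target
instance (arr : List Int) (target : Int) (out : List Int) : Decidable (Spec_insert_target arr target out) := by unfold Spec_insert_target; infer_instance

-- ===== CLAIM (what is proved, stated in full; the proofs are below) =====
def Claim_equal_insert_target : Prop := ∀ (arr : List Int) (target : Int), Dom_insert_target arr target → Spec_insert_target arr target (insert_target arr target)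

-- ===== LEMMAS AND PROOFS =====

-- ---- A side: the result is a sorted permutation of arr ++ [target] ----

-- insertion into the REVERSED sorted prefix, as the while loop performs it
def insRev (cur : Int) : List Int → List Int
  | [] => [cur]
  | b :: rest => if cur < b then b :: insRev cur rest else cur :: b :: rest

theorem insRev_perm (cur : Int) (rp : List Int) : (insRev cur rp).Perm (cur :: rp) := by
  induction rp with
  | nil => simp [insRev]
  | cons b rest ih =>
    simp only [insRev]
    split
    · exact ((ih.cons b).trans (List.Perm.swap cur b rest))
    · exact List.Perm.refl _

theorem insRev_length (cur : Int) (rp : List Int) : (insRev cur rp).length = rp.length + 1 :=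
  (insRev_perm cur rp).length_eq.trans (by simp)

theorem insRev_pairwise (cur : Int) (rp : List Int) (h : rp.Pairwise (· ≥ ·)) :
    (insRev cur rp).Pairwise (· ≥ ·) := by
  induction rp with
  | nil => simp [insRev]
  | cons b rest ih =>
    rw [List.pairwise_cons] at h
    simp only [insRev]
    split
    · rename_i hlt
      rw [List.pairwise_cons]
      refine ⟨fun x hx => ?_, ih h.2⟩
      rcases List.mem_cons.mp ((insRev_perm cur rest).mem_iff.mp hx) with h1 | h1
      · subst h1; omega
      · exact h.1 x h1
    · rename_i hge
      rw [List.pairwise_cons]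
      refine ⟨fun x hx => ?_, by rw [List.pairwise_cons]; exact h⟩
      rcases List.mem_cons.mp hx with h1 | h1
      · subst h1; omega
      · have := h.1 x h1; omega

theorem insertShiftA_spec (cur : Int) (rp : List Int) (b : Int) (suf : List Int) :
    insertShiftA cur rp.length (rp.reverse ++ b :: suf) = (insRev cur rp).reverse ++ suf := by
  induction rp generalizing b suf with
  | nil => simp [insertShiftA, insRev]
  | cons a rp' ih =>
    have hget : (rp'.reverse ++ a :: b :: suf).getD rp'.length 0 = a := by
      rw [List.getD_eq_getElem?_getD, List.getElem?_append_right (by simp)]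
      simp
    have hsh : (a :: rp').reverse ++ b :: suf = rp'.reverse ++ a :: b :: suf := by simp
    have hset : (rp'.reverse ++ a :: b :: suf).set (rp'.length + 1) a
        = rp'.reverse ++ a :: a :: suf := by
      rw [List.set_append]
      simp
    have hsetc : (rp'.reverse ++ a :: b :: suf).set (rp'.length + 1) cur
        = rp'.reverse ++ a :: cur :: suf := by
      rw [List.set_append]
      simp
    simp only [List.length_cons, insertShiftA, hsh, hget]
    split
    · rename_i hlt
      rw [hset, ih a (a :: suf)]
      simp [insRev, hlt]
    · rename_i hge
      rw [hsetc]
      simp [insRev, hge]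

-- loop invariant for the outer `for i in range(1, len(arr))`
theorem loopA_spec (cnt : Nat) : ∀ (i : Nat) (l : List Int), 1 ≤ i → i + cnt = l.length →
    ((l.take i).reverse).Pairwise (· ≥ ·) →
    ((List.range' i cnt).foldl (fun xs j => insertShiftA (xs.getD j 0) j xs) l).Pairwise (· ≤ ·) ∧
    ((List.range' i cnt).foldl (fun xs j => insertShiftA (xs.getD j 0) j xs) l).Perm l := by
  induction cnt with
  | zero =>
    intro i l h1 hlen hsort
    have : l.take i = l := List.take_of_length_le (by omega)
    rw [this] at hsort
    constructor
    · simpa [List.pairwise_reverse] using hsort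
    · simp
  | succ cnt ih =>
    intro i l h1 hlen hsort
    have hi : i < l.length := by omega
    obtain ⟨b, hb⟩ : ∃ b, l[i] = b := ⟨l[i], rfl⟩
    have hdec : l = l.take i ++ b :: l.drop (i + 1) := by
      conv_lhs => rw [← List.take_append_drop i l]
      rw [List.drop_eq_getElem_cons hi, hb]
    have hlen_take : (l.take i).length = i := by simp; omega
    have hget : l.getD i 0 = b := by
      rw [List.getD_eq_getElem?_getD, List.getElem?_eq_getElem hi, hb]; rfl
    set rp := (l.take i).reverse with hrp
    have hrplen : rp.length = i := by rw [hrp, List.length_reverse, hlen_take]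
    have htk : l.take i = rp.reverse := by rw [hrp, List.reverse_reverse]
    have hstep : insertShiftA (l.getD i 0) i l = (insRev b rp).reverse ++ l.drop (i + 1) := by
      rw [hget]
      have h0 := insertShiftA_spec b rp b (l.drop (i + 1))
      rw [hrplen, ← htk, ← hdec] at h0
      exact h0
    have hperm' : ((insRev b rp).reverse ++ l.drop (i + 1)).Perm l := by
      have p1 : ((insRev b rp).reverse ++ l.drop (i + 1)).Perm (insRev b rp ++ l.drop (i + 1)) :=
        (List.reverse_perm _).append_right _
      have p2 : (insRev b rp ++ l.drop (i + 1)).Perm ((b :: rp) ++ l.drop (i + 1)) :=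
        (insRev_perm b rp).append_right _
      have p4 : (b :: (rp ++ l.drop (i + 1))).Perm (rp ++ b :: l.drop (i + 1)) :=
        List.perm_middle.symm
      have p5 : (rp ++ b :: l.drop (i + 1)).Perm (l.take i ++ b :: l.drop (i + 1)) := by
        rw [hrp]
        exact (List.reverse_perm _).append_right _
      have := ((p1.trans p2).trans p4).trans p5
      rwa [← hdec] at this
    have hlen' : ((insRev b rp).reverse ++ l.drop (i + 1)).length = l.length := hperm'.length_eq
    have htake' : ((insRev b rp).reverse ++ l.drop (i + 1)).take (i + 1) = (insRev b rp).reverse := by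
      rw [List.take_append_of_le_length (by rw [List.length_reverse, insRev_length, hrplen])]
      rw [List.take_of_length_le (by rw [List.length_reverse, insRev_length, hrplen])]
    have hsort' : ((((insRev b rp).reverse ++ l.drop (i + 1)).take (i + 1)).reverse).Pairwise (· ≥ ·) := by
      rw [htake', List.reverse_reverse]
      exact insRev_pairwise _ _ hsort
    rw [List.range'_succ]
    simp only [List.foldl_cons, hstep]
    obtain ⟨hs, hp⟩ := ih (i + 1) ((insRev b rp).reverse ++ l.drop (i + 1)) (by omega)
      (by rw [hlen']; omega) hsort'
    exact ⟨hs, hp.trans hperm'⟩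

theorem insertA_sorted_perm (arr : List Int) (target : Int) :
    (insert_target arr target).Pairwise (· ≤ ·) ∧
    (insert_target arr target).Perm (arr ++ [target]) := by
  unfold insert_target
  have h1 : (((arr ++ [target]).take 1).reverse).Pairwise (fun a b => a ≥ b) := by
    cases arr with
    | nil => simp
    | cons a t => simp
  have := loopA_spec ((arr ++ [target]).length - 1) 1 (arr ++ [target]) (by omega)
    (by simp; omega) h1
  simpa using this

-- ---- B side: msortB is a sorted permutation ----

theorem mergeGoB_eq (acc xs ys : List Int) :
    mergeGoB acc xs ys = acc ++ List.merge xs ys (fun a b => a ≤ b) := by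
  induction xs generalizing acc ys with
  | nil => cases ys <;> simp [mergeGoB]
  | cons x xs ih =>
    induction ys generalizing acc with
    | nil => simp [mergeGoB]
    | cons y ys ihy =>
      rw [mergeGoB, List.merge]
      by_cases h : x ≤ y
      · simp only [h, if_pos, decide_true]
        rw [ih]
        simp
      · simp only [h, if_neg, decide_false, not_false_iff]
        rw [ihy]
        simp

theorem msortB_perm (l : List Int) : (msortB l).Perm l := by
  rw [msortB]
  split
  · exact List.Perm.refl _
  · rename_i h
    rw [mergeGoB_eq, List.nil_append]
    have p1 : (List.merge (msortB (l.take (l.length / 2))) (msortB (l.drop (l.length / 2)))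
        (fun a b => a ≤ b)).Perm
        (msortB (l.take (l.length / 2)) ++ msortB (l.drop (l.length / 2))) :=
      List.merge_perm_append _
    have p2 := (msortB_perm (l.take (l.length / 2))).append (msortB_perm (l.drop (l.length / 2)))
    have := p1.trans p2
    rwa [List.take_append_drop] at this
termination_by l.length
decreasing_by
  · simp; omega
  · simp; omega

theorem msortB_sorted (l : List Int) : (msortB l).Pairwise (· ≤ ·) := by
  rw [msortB]
  split
  · rename_i h
    match l, h with
    | [], _ => simp
    | [a], _ => simp
  · exact mergeGoB_eq [] _ _ ▸ List.Pairwise.merge (msortB_sorted _) (msortB_sorted _)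
termination_by l.length
decreasing_by
  · simp; omega
  · simp; omega

-- ===== VERDICT (by name: the statement is the Claim_ definition above) =====
theorem insert_target_spec : Claim_equal_insert_target := by
  intro arr target _
  unfold Spec_insert_target insert_target_alt
  obtain ⟨hsA, hpA⟩ := insertA_sorted_perm arr target
  have hpB := msortB_perm (arr ++ [target])
  have hsB := msortB_sorted (arr ++ [target])
  exact (hpA.trans hpB.symm).eq_of_pairwise' hsA hsB
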